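-- pv_equiv track=rewrite | github.com/kassemfor/perp_ai_financial_report_generator | src/backend/file_parser.py | _extract_tables_from_text
-- ===== SOURCE A (Python) =====
-- from typing import Any, Dict, List, Optional, Tuple
--
-- def _extract_tables_from_text(text: str) -> List[List[List[str]]]:
--     """Attempt to extract table-like structures from text."""
--     if not text:
--         return []
--
--     lines = text.split("\n")
--     tables: List[List[List[str]]] = []
--     current_table: List[List[str]] = []
--
--     for line in lines:
--         stripped = line.strip()
--         if not stripped:
--             if len(current_table) >= 2:
--                 tables.append(current_table)
--             current_table = []
--             continue
--
--         delimiter = None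
--         if "|" in line:
--             delimiter = "|"
--         elif "\t" in line:
--             delimiter = "\t"
--         elif line.count(",") >= 2:
--             delimiter = ","
--
--         if delimiter:
--             row = [cell.strip() for cell in line.split(delimiter)]
--             if len([cell for cell in row if cell]) >= 2:
--                 current_table.append(row)
--                 continue
--
--         if len(current_table) >= 2:
--             tables.append(current_table)
--         current_table = []
--
--     if len(current_table) >= 2:
--         tables.append(current_table)
--
--     return tables
-- ===== SOURCE B (Python) =====
-- from typing import List, Optional
--
--
-- def _classify(line: str) -> Optional[List[str]]:
--     """Return the parsed row if `line` is a valid table row, else None."""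
--     if not line.strip():
--         return None
--     if "|" in line:
--         delimiter = "|"
--     elif "\t" in line:
--         delimiter = "\t"
--     elif line.count(",") >= 2:
--         delimiter = ","
--     else:
--         return None
--     row = [cell.strip() for cell in line.split(delimiter)]
--     return row if len([cell for cell in row if cell]) >= 2 else None
--
--
-- def _split_runs(rows):
--     """Split the classified lines into the maximal runs of consecutive rows."""
--     groups = []
--     run = []
--     for r in rows:
--         if r is None:
--             groups.append(run)
--             run = []
--         else:
--             run.append(r)
--     groups.append(run)
--     return groups
--
--
-- def _extract_tables_from_text(text: str) -> List[List[List[str]]]: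
--     rows = [_classify(line) for line in text.split("\n")]
--     return [g for g in _split_runs(rows) if len(g) >= 2]
-- ===== Notes on version B (the rewrite author's own statement) =====
-- stated objective: alternative
-- what changed: Replaces A's single-pass state machine (interleaved flush logic in three places) with a map of a classify(line) helper over all lines followed by a generic run-splitter on the Option values and a length filter.
import Mathlib
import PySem

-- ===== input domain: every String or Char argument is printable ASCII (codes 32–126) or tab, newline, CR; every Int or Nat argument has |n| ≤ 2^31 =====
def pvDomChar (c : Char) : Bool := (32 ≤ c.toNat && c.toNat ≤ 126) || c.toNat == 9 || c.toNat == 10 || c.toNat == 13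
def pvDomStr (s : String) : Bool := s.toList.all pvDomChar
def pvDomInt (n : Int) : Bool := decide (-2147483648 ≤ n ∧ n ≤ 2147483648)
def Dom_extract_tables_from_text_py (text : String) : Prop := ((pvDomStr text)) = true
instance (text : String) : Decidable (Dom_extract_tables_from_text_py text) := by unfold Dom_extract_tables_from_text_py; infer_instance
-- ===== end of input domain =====

-- B re-decomposes A as classify-each-line, split into runs, filter runs of length ≥ 2; same cost, plainer structure (objective: alternative).

-- ===== PORT A =====
-- line.split(sep) is PySem.Str.split? (none only for sep = ""; every separator here is nonempty, so .getD [] is exact)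
-- one loop iteration of A: state = (tables so far, current_table)
def pvStepA (s : List (List (List String)) × List (List String)) (line : String) :
    List (List (List String)) × List (List String) :=
  let stripped := PySem.Str.strip line
  if stripped = "" then
    ((if 2 ≤ s.2.length then s.1 ++ [s.2] else s.1), [])
  else
    let delimiter : Option String :=
      if PySem.Str.isIn "|" line then some "|"
      else if PySem.Str.isIn "\t" line then some "\t"
      else if 2 ≤ PySem.Str.count line "," then some ","
      else none
    match delimiter with
    | some d =>
        let row := ((PySem.Str.split? line d).getD []).map PySem.Str.strip
        if 2 ≤ (row.filter (fun c => c != "")).length then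
          (s.1, s.2 ++ [row])
        else
          ((if 2 ≤ s.2.length then s.1 ++ [s.2] else s.1), [])
    | none =>
        ((if 2 ≤ s.2.length then s.1 ++ [s.2] else s.1), [])

def extract_tables_from_text_py (text : String) : List (List (List String)) :=
  if text = "" then []
  else
    let lines := (PySem.Str.split? text "\n").getD []
    let s := lines.foldl pvStepA ([], [])
    if 2 ≤ s.2.length then s.1 ++ [s.2] else s.1

-- ===== PORT B =====
-- _classify: the parsed row if the line is a valid table row, else none
def pvClassify (line : String) : Option (List String) :=
  if PySem.Str.strip line = "" then none
  else
    let delimiter : Option String :=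
      if PySem.Str.isIn "|" line then some "|"
      else if PySem.Str.isIn "\t" line then some "\t"
      else if 2 ≤ PySem.Str.count line "," then some ","
      else none
    match delimiter with
    | none => none
    | some d =>
        let row := ((PySem.Str.split? line d).getD []).map PySem.Str.strip
        if 2 ≤ (row.filter (fun c => c != "")).length then some row else none

-- _split_runs: split at the none entries, keeping every (possibly empty) segment
def pvSplitRuns (rows : List (Option (List String))) : List (List (List String)) :=
  let s := rows.foldl
    (fun (s : List (List (List String)) × List (List String)) r =>
      match r with
      | none => (s.1 ++ [s.2], [])
      | some v => (s.1, s.2 ++ [v]))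
    ([], [])
  s.1 ++ [s.2]

def extract_tables_from_text_py_alt (text : String) : List (List (List String)) :=
  let rows := ((PySem.Str.split? text "\n").getD []).map pvClassify
  (pvSplitRuns rows).filter (fun g => decide (2 ≤ g.length))

-- ===== PRECONDITION & SPEC =====
def Spec_extract_tables_from_text_py (text : String) (out : List (List (List String))) : Prop := out = extract_tables_from_text_py_alt text
instance (text : String) (out : List (List (List String))) : Decidable (Spec_extract_tables_from_text_py text out) := by unfold Spec_extract_tables_from_text_py; infer_instance

-- ===== CLAIM (what is proved, stated in full; the proofs are below) =====
def Claim_equal_extract_tables_from_text_py : Prop := ∀ (text : String), Dom_extract_tables_from_text_py text → Spec_extract_tables_from_text_py text (extract_tables_from_text_py text)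

-- ===== LEMMAS AND PROOFS =====

-- A's loop body, viewed through pvClassify
theorem pvStepA_classify (s : List (List (List String)) × List (List String)) (line : String) :
    pvStepA s line =
      match pvClassify line with
      | some row => (s.1, s.2 ++ [row])
      | none => ((if 2 ≤ s.2.length then s.1 ++ [s.2] else s.1), []) := by
  unfold pvStepA pvClassify
  split_ifs <;> simp_all <;> split_ifs <;> simp_all

-- the fold invariant: A's tables are B's groups filtered to length ≥ 2
theorem pvFold_invariant (lines : List String)
    (G : List (List (List String))) (cur : List (List String)) :
    lines.foldl pvStepA (G.filter (fun g => decide (2 ≤ g.length)), cur) =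
      (((lines.map pvClassify).foldl
          (fun (s : List (List (List String)) × List (List String)) r =>
            match r with
            | none => (s.1 ++ [s.2], [])
            | some v => (s.1, s.2 ++ [v]))
          (G, cur)).1.filter (fun g => decide (2 ≤ g.length)),
        ((lines.map pvClassify).foldl
          (fun (s : List (List (List String)) × List (List String)) r =>
            match r with
            | none => (s.1 ++ [s.2], [])
            | some v => (s.1, s.2 ++ [v]))
          (G, cur)).2) := by
  induction lines generalizing G cur with
  | nil => simp
  | cons l ls ih =>
      simp only [List.foldl_cons, List.map_cons, pvStepA_classify]
      cases h : pvClassify l with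
      | some row => simpa [h] using ih G (cur ++ [row])
      | none =>
          have : (if 2 ≤ cur.length then
              G.filter (fun g => decide (2 ≤ g.length)) ++ [cur]
            else G.filter (fun g => decide (2 ≤ g.length))) =
              (G ++ [cur]).filter (fun g => decide (2 ≤ g.length)) := by
            by_cases hc : 2 ≤ cur.length <;>
              simp [List.filter_append, hc]
          simpa [h, this] using ih (G ++ [cur]) []

-- ===== VERDICT (by name: the statement is the Claim_ definition above) =====
theorem extract_tables_from_text_py_spec : Claim_equal_extract_tables_from_text_py := by
  intro text _
  unfold Spec_extract_tables_from_text_py extract_tables_from_text_py extract_tables_from_text_py_alt pvSplitRuns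
  by_cases ht : text = ""
  · subst ht; decide
  · simp only [ht, if_false]
    have h := pvFold_invariant ((PySem.Str.split? text "\n").getD []) [] []
    simp only [List.filter_nil] at h
    rw [h]
    by_cases hc : 2 ≤ (((((PySem.Str.split? text "\n").getD []).map pvClassify).foldl
        (fun (s : List (List (List String)) × List (List String)) r =>
          match r with
          | none => (s.1 ++ [s.2], [])
          | some v => (s.1, s.2 ++ [v])) ([], [])).2).length <;>
      simp [List.filter_append, hc]
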